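-- pv_equiv track=rewrite | github.com/HK-Tan/ORACLE-VARX | old-code/old-modules/DML_tools.py | create_index_mapping
-- ===== SOURCE A (Python) =====
-- def create_index_mapping(T_names_prev, T_names_post, d_y):
--     """
--     Create index mapping as 2-tuples (pre_idx, post_idx) for coefficient comparison.
--
--     Inputs:
--     - T_names_prev: List of treatment variable names from the previous coefficients.
--     - T_names_post: List of treatment variable names from the post coefficients.
--     - d_y: Number of assets (ie outcome) in the model, placed as the outcome variables.
--
--     Returns:
--     - idx_pairs: List of (pre_idx, post_idx) tuples for existing coefficients
--         i.e. Of the previous coefficients, which ones do they map to in the post coefficients?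
--     - idx_new: List of post_idx for new coefficients
--     """
--     d_T_prev = len(T_names_prev)
--     d_T_post = len(T_names_post)
--
--     idx_pairs = []
--     idx_new = []
--
--     # Create mapping for all coefficients
--     for y in range(d_y):
--         for j_post, name_post in enumerate(T_names_post):
--             post_idx = y * d_T_post + j_post
--             if name_post in T_names_prev:
--                 # This is an existing coefficient
--                 j_prev = T_names_prev.index(name_post)
--                 pre_idx = y * d_T_prev + j_prev
--                 idx_pairs.append((pre_idx, post_idx))
--             else:
--                 # If not, then this is a new coefficient
--                 idx_new.append(post_idx)
--
--     return idx_pairs, idx_new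
-- ===== SOURCE B (Python) =====
-- def create_index_mapping(T_names_prev, T_names_post, d_y):
--     d_T_prev = len(T_names_prev)
--     d_T_post = len(T_names_post)
--
--     # Phase 1: one pass over T_names_post builds a column-level table,
--     # so the membership test / .index scan of T_names_prev is done once
--     # per column instead of once per (y, column).
--     col_pairs = []   # (j_prev, j_post) for columns present in T_names_prev
--     col_new = []     # j_post for new columns
--     for j_post, name_post in enumerate(T_names_post):
--         try:
--             j_prev = T_names_prev.index(name_post)
--         except ValueError:
--             col_new.append(j_post)
--         else:
--             col_pairs.append((j_prev, j_post))
--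
--     # Phase 2: expand the table per outcome y (y-major, column order preserved).
--     idx_pairs = []
--     idx_new = []
--     for y in range(d_y):
--         base_prev = y * d_T_prev
--         base_post = y * d_T_post
--         for j_prev, j_post in col_pairs:
--             idx_pairs.append((base_prev + j_prev, base_post + j_post))
--         for j_post in col_new:
--             idx_new.append(base_post + j_post)
--     return idx_pairs, idx_new
-- ===== Notes on version B (the rewrite author's own statement) =====
-- stated objective: faster
-- what changed: B builds the column-level (j_prev, j_post)/new-column table in a single pass over T_names_post, then expands it per outcome y, instead of re-running the membership test and T_names_prev.index scan inside every y iteration.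
import Mathlib
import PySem

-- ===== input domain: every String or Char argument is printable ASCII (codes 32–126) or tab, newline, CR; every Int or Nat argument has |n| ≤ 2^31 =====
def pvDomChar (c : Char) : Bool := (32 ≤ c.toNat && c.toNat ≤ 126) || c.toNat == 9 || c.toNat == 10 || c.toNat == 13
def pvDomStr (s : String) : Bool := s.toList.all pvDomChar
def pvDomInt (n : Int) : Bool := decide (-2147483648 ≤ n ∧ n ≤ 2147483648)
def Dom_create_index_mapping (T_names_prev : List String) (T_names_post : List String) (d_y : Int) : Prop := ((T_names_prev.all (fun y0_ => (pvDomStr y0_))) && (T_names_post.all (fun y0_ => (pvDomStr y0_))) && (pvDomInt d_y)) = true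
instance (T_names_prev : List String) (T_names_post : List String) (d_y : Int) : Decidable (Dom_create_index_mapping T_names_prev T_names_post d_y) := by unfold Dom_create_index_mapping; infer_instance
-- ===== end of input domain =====

-- B builds the column-level mapping table once, then expands it per outcome y,
-- instead of redoing the membership/index scan inside every y iteration (faster).


-- ===== PORT A =====
-- 'name_post in T_names_prev' followed by 'T_names_prev.index(name_post)' is ported
-- as one match on PySem.List.index? (some ↔ membership, exact first-occurrence index).
def create_index_mapping (T_names_prev : List String) (T_names_post : List String) (d_y : Int) : (List (Int × Int)) × List Int :=
  let d_T_prev : Int := T_names_prev.length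
  let d_T_post : Int := T_names_post.length
  (PySem.List.pyRange 0 d_y 1).foldl (fun acc y =>
    (PySem.List.enumerate T_names_post 0).foldl (fun acc2 p =>
      let post_idx := y * d_T_post + p.1
      match PySem.List.index? T_names_prev p.2 with
      | some j_prev => (acc2.1 ++ [(y * d_T_prev + (j_prev : Int), post_idx)], acc2.2)
      | none => (acc2.1, acc2.2 ++ [post_idx])) acc) ([], [])

-- ===== PORT B =====
def create_index_mapping_alt (T_names_prev : List String) (T_names_post : List String) (d_y : Int) : (List (Int × Int)) × List Int :=
  let d_T_prev : Int := T_names_prev.length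
  let d_T_post : Int := T_names_post.length
  -- Phase 1: column-level table
  let cols := (PySem.List.enumerate T_names_post 0).foldl
    (fun (c : List (Int × Int) × List Int) p =>
      match PySem.List.index? T_names_prev p.2 with
      | some j_prev => (c.1 ++ [((j_prev : Int), p.1)], c.2)
      | none => (c.1, c.2 ++ [p.1])) ([], [])
  -- Phase 2: expand per outcome y
  (PySem.List.pyRange 0 d_y 1).foldl (fun acc y =>
    let base_prev := y * d_T_prev
    let base_post := y * d_T_post
    (acc.1 ++ cols.1.map (fun q => (base_prev + q.1, base_post + q.2)),
     acc.2 ++ cols.2.map (fun j => base_post + j))) ([], [])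

-- ===== PRECONDITION & SPEC =====
def Spec_create_index_mapping (T_names_prev : List String) (T_names_post : List String) (d_y : Int) (out : (List (Int × Int)) × List Int) : Prop := out = create_index_mapping_alt T_names_prev T_names_post d_y
instance (T_names_prev : List String) (T_names_post : List String) (d_y : Int) (out : (List (Int × Int)) × List Int) : Decidable (Spec_create_index_mapping T_names_prev T_names_post d_y out) := by unfold Spec_create_index_mapping; infer_instance

-- ===== CLAIM (what is proved, stated in full; the proofs are below) =====
def Claim_equal_create_index_mapping : Prop := ∀ (T_names_prev : List String) (T_names_post : List String) (d_y : Int), Dom_create_index_mapping T_names_prev T_names_post d_y → Spec_create_index_mapping T_names_prev T_names_post d_y (create_index_mapping T_names_prev T_names_post d_y)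

-- ===== LEMMAS AND PROOFS =====

-- per-element contributions of the column-table step (proof-only helpers)
def pvAcol (prev : List String) (p : Int × String) : List (Int × Int) :=
  match PySem.List.index? prev p.2 with
  | some j_prev => [((j_prev : Int), p.1)]
  | none => []

def pvBcol (prev : List String) (p : Int × String) : List Int :=
  match PySem.List.index? prev p.2 with
  | some _ => []
  | none => [p.1]

-- folds with pointwise-equal step functions agree
theorem foldl_ext {α β : Type} (f g : β → α → β) (h : ∀ b a, f b a = g b a)
    (l : List α) (b : β) : l.foldl f b = l.foldl g b := by
  induction l generalizing b with
  | nil => rfl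
  | cons x t ih => simp only [List.foldl_cons, h, ih]

-- a fold whose step appends per-element lists to both components is a flatMap
theorem foldl_pair_append {α γ δ : Type} (A : α → List γ) (B : α → List δ)
    (l : List α) (c : List γ × List δ) :
    l.foldl (fun c p => (c.1 ++ A p, c.2 ++ B p)) c
      = (c.1 ++ l.flatMap A, c.2 ++ l.flatMap B) := by
  induction l generalizing c with
  | nil => simp
  | cons p t ih => simp [ih]

-- B's column-table fold, in flatMap form
theorem cols_eq (prev : List String) (l : List (Int × String)) :
    l.foldl (fun (c : List (Int × Int) × List Int) p =>
      match PySem.List.index? prev p.2 with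
      | some j_prev => (c.1 ++ [((j_prev : Int), p.1)], c.2)
      | none => (c.1, c.2 ++ [p.1])) ([], [])
    = (l.flatMap (pvAcol prev), l.flatMap (pvBcol prev)) := by
  rw [foldl_ext _ (fun (c : List (Int × Int) × List Int) p =>
        (c.1 ++ pvAcol prev p, c.2 ++ pvBcol prev p))
      (fun c p => by cases h : PySem.List.index? prev p.2 <;> simp only [pvAcol, pvBcol, h] <;> simp),
     foldl_pair_append]
  simp

-- A's inner (per-y) loop, in flatMap form
theorem inner_eq (prev : List String) (dp dq y : Int) (l : List (Int × String))
    (acc : List (Int × Int) × List Int) :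
    l.foldl (fun acc2 p =>
      match PySem.List.index? prev p.2 with
      | some j_prev => (acc2.1 ++ [(y * dp + (j_prev : Int), y * dq + p.1)], acc2.2)
      | none => (acc2.1, acc2.2 ++ [y * dq + p.1])) acc
    = (acc.1 ++ (l.flatMap (pvAcol prev)).map (fun q => (y * dp + q.1, y * dq + q.2)),
       acc.2 ++ (l.flatMap (pvBcol prev)).map (fun j => y * dq + j)) := by
  rw [foldl_ext _ (fun (c : List (Int × Int) × List Int) p =>
        (c.1 ++ (pvAcol prev p).map (fun q => (y * dp + q.1, y * dq + q.2)),
         c.2 ++ (pvBcol prev p).map (fun j => y * dq + j)))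
      (fun c p => by cases h : PySem.List.index? prev p.2 <;> simp only [pvAcol, pvBcol, h] <;> simp),
     foldl_pair_append]
  simp [List.map_flatMap]

-- ===== VERDICT (by name: the statement is the Claim_ definition above) =====
theorem create_index_mapping_spec : Claim_equal_create_index_mapping := by
  intro prev post d_y _
  simp only [Spec_create_index_mapping, create_index_mapping, create_index_mapping_alt]
  rw [cols_eq]
  exact foldl_ext _ _
    (fun acc y => inner_eq prev prev.length post.length y (PySem.List.enumerate post 0) acc) _ _
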